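-- pv_equiv track=rewrite | github.com/USNavalResearchLaboratory/geoips2 | products/pmw_tb.py | is_required_product
-- ===== SOURCE A (Python) =====
-- RGBA_PRODUCTS = {'color37': ['37H', '37V'],
--                  'color89': ['89H', '89V'],
--                  }
--
-- SINGLE_ARRAY_PRODUCTS = {'37pct': ['37H', '37V'],
--                          '89pct': ['89H', '89V'],
--                          }
--
-- def is_required_product(product_list, product_name):
--     if product_list is None:
--         return True
--     if product_name in product_list or product_name+'Nearest' in product_list:
--         return True
--     for rgba_prods in RGBA_PRODUCTS.values():
--        if product_name in rgba_prods or product_name+'Nearest' in rgba_prods: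
--            return True
--     for sa_prods in SINGLE_ARRAY_PRODUCTS.values():
--        if product_name in sa_prods or product_name+'Nearest' in sa_prods:
--            return True
--     if product_name in RGBA_PRODUCTS or product_name+'Nearest' in RGBA_PRODUCTS:
--         return True
--     if product_name in SINGLE_ARRAY_PRODUCTS or product_name+'Nearest' in SINGLE_ARRAY_PRODUCTS:
--         return True
--     return False
-- ===== SOURCE B (Python) =====
-- # B recognises the built-in PMW product names by PARSING the name (prefix/suffix
-- # pattern: 'color'+freq, or freq+{'H','V','pct'} with freq in {'37','89'}) instead of
-- # scanning the product dicts, and checks the caller's list in one explicit pass.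
--
-- def _is_builtin_pmw(name):
--     """True iff name is a key or listed channel of the fixed PMW product tables:
--     those are exactly 'color'+freq, freq+'H', freq+'V', freq+'pct' for freq in 37/89."""
--     if name.startswith('color'):
--         return name[5:] in ('37', '89')
--     if name.startswith('37') or name.startswith('89'):
--         return name[2:] in ('H', 'V', 'pct')
--     return False
--
--
-- def is_required_product(product_list, product_name):
--     if product_list is None:
--         return True
--     nearest = product_name + 'Nearest'
--     for prod in product_list:
--         if prod == product_name or prod == nearest:
--             return True
--     return _is_builtin_pmw(product_name)
-- ===== Notes on version B (the rewrite author's own statement) =====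
-- stated objective: alternative
-- what changed: B recognises the fixed PMW names by parsing the product name (prefix 'color'/'37'/'89' plus a checked suffix 'H'/'V'/'pct'/frequency) instead of scanning the values and keys of both product dicts, and replaces A's two containment passes over product_list with one explicit early-return pass comparing each element against the two candidate names.
import Mathlib
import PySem

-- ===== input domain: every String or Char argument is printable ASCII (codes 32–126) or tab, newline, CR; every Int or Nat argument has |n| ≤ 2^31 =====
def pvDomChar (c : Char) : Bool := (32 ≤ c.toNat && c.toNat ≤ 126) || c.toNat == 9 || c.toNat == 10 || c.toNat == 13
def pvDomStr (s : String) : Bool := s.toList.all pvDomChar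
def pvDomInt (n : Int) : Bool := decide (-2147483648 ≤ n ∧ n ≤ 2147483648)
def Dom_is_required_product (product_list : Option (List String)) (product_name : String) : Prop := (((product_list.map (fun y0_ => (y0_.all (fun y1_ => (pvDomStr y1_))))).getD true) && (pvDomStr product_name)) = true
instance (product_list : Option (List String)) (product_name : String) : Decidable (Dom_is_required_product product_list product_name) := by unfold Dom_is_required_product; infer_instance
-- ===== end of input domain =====

-- B recognises the built-in PMW names by parsing the name (prefix 'color'/'37'/'89' plus a
-- checked suffix) instead of scanning both product dicts, and checks the caller's list in one
-- explicit pass (objective: simpler/alternative).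


-- ===== PORT A =====
-- dicts as association lists in insertion order
def RGBA_PRODUCTS : List (String × List String) :=
  [("color37", ["37H", "37V"]), ("color89", ["89H", "89V"])]

def SINGLE_ARRAY_PRODUCTS : List (String × List String) :=
  [("37pct", ["37H", "37V"]), ("89pct", ["89H", "89V"])]

-- the two `for … return True` loops = any over the dict's values
def is_required_product (product_list : Option (List String)) (product_name : String) : Bool :=
  match product_list with
  | none => true
  | some pl =>
    if pl.contains product_name || pl.contains (product_name ++ "Nearest") then true
    else if (RGBA_PRODUCTS.map Prod.snd).any
        (fun rgba_prods => rgba_prods.contains product_name || rgba_prods.contains (product_name ++ "Nearest")) then true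
    else if (SINGLE_ARRAY_PRODUCTS.map Prod.snd).any
        (fun sa_prods => sa_prods.contains product_name || sa_prods.contains (product_name ++ "Nearest")) then true
    else if (RGBA_PRODUCTS.map Prod.fst).contains product_name ||
            (RGBA_PRODUCTS.map Prod.fst).contains (product_name ++ "Nearest") then true
    else if (SINGLE_ARRAY_PRODUCTS.map Prod.fst).contains product_name ||
            (SINGLE_ARRAY_PRODUCTS.map Prod.fst).contains (product_name ++ "Nearest") then true
    else false

-- ===== PORT B =====
-- name.startswith / name[5:] / name[2:] ported with PySem.Str primitives
def isBuiltinPMW (name : String) : Bool :=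
  if PySem.Str.startswith name "color" then
    PySem.Str.slice name (some 5) none = "37" || PySem.Str.slice name (some 5) none = "89"
  else if PySem.Str.startswith name "37" || PySem.Str.startswith name "89" then
    PySem.Str.slice name (some 2) none = "H" || PySem.Str.slice name (some 2) none = "V" ||
      PySem.Str.slice name (some 2) none = "pct"
  else false

-- the `for prod in product_list: …` early-return loop
def scanProducts (product_name nearest : String) : List String → Bool
  | [] => false
  | prod :: rest =>
    if prod = product_name ∨ prod = nearest then true
    else scanProducts product_name nearest rest

def is_required_product_alt (product_list : Option (List String)) (product_name : String) : Bool :=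
  match product_list with
  | none => true
  | some pl =>
    if scanProducts product_name (product_name ++ "Nearest") pl then true
    else isBuiltinPMW product_name

-- ===== PRECONDITION & SPEC =====
def Spec_is_required_product (product_list : Option (List String)) (product_name : String) (out : Bool) : Prop := out = is_required_product_alt product_list product_name
instance (product_list : Option (List String)) (product_name : String) (out : Bool) : Decidable (Spec_is_required_product product_list product_name out) := by unfold Spec_is_required_product; infer_instance

-- ===== CLAIM =====
def Claim_equal_is_required_product : Prop := ∀ (product_list : Option (List String)) (product_name : String), Dom_is_required_product product_list product_name → Spec_is_required_product product_list product_name (is_required_product product_list product_name)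

-- ===== LEMMAS AND PROOFS =====

-- the canonical membership proposition both sides reduce to
def PBuiltin (n : String) : Prop :=
  n = "37H" ∨ n = "37V" ∨ n = "89H" ∨ n = "89V" ∨
  n = "color37" ∨ n = "color89" ∨ n = "37pct" ∨ n = "89pct"

lemma nearest_ne (n s : String) (h7 : s.toList.length ≤ 7) (hne : ("Nearest" : String) ≠ s) :
    n ++ "Nearest" ≠ s := by
  intro he
  rw [← String.toList_inj, String.toList_append] at he
  have hl := congrArg List.length he
  simp only [List.length_append] at hl
  have h7' : ("Nearest" : String).toList.length = 7 := by decide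
  have hn0 : n.toList.length = 0 := by omega
  rw [List.length_eq_zero_iff] at hn0
  rw [hn0, List.nil_append, String.toList_inj] at he
  exact hne he

lemma slice_eq_iff (n : String) (k : Int) (hk : 0 ≤ k) (s : String) :
    (PySem.Str.slice n (some k) none = s) ↔ n.toList.drop k.toNat = s.toList := by
  rw [← String.toList_inj, PySem.Str.toList_slice, PySem.Chars.slice_eq_listSlice,
      PySem.List.slice_from _ hk]

lemma pvCancel {p s : String} {t u : List Char} (ht : p.toList ++ t = s.toList)
    (he : s.toList = p.toList ++ u) : t = u :=
  List.append_cancel_left (ht.trans he)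

lemma builtin_iff (n : String) : isBuiltinPMW n = true ↔ PBuiltin n := by
  unfold isBuiltinPMW
  split_ifs with hc h37
  · simp only [PySem.Str.startswith_eq, PySem.Chars.startswith_iff] at hc
    obtain ⟨t, ht⟩ := hc
    have hd : n.toList.drop 5 = t := by
      rw [← ht]; simp
        --  "color".toList t
    simp only [Bool.or_eq_true, decide_eq_true_eq, slice_eq_iff n 5 (by norm_num)]
    rw [show ((5:Int).toNat) = 5 from rfl, hd]
    constructor
    · rintro (h | h) <;> subst h
      · have hn : n = "color37" := String.toList_inj.mp (ht.symm.trans (by decide))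
        subst hn; simp [PBuiltin]
      · have hn : n = "color89" := String.toList_inj.mp (ht.symm.trans (by decide))
        subst hn; simp [PBuiltin]
    · rintro (hp | hp | hp | hp | hp | hp | hp | hp) <;> subst hp
      · simp at ht
      · simp at ht
      · simp at ht
      · simp at ht
      · exact Or.inl (pvCancel ht (by decide))
      · exact Or.inr (pvCancel ht (by decide))
      · simp at ht
      · simp at ht
  · rcases Bool.or_eq_true _ _ |>.mp h37 with h | h <;>
      simp only [PySem.Str.startswith_eq, PySem.Chars.startswith_iff] at h hc <;>
      obtain ⟨t, ht⟩ := h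
    · have hd : n.toList.drop 2 = t := by
        rw [← ht]; simp
        --  "37".toList t
      simp only [Bool.or_eq_true, decide_eq_true_eq, slice_eq_iff n 2 (by norm_num)]
      rw [show ((2:Int).toNat) = 2 from rfl, hd]
      constructor
      · rintro ((h | h) | h) <;> subst h
        · have hn : n = "37H" := String.toList_inj.mp (ht.symm.trans (by decide))
          subst hn; simp [PBuiltin]
        · have hn : n = "37V" := String.toList_inj.mp (ht.symm.trans (by decide))
          subst hn; simp [PBuiltin]
        · have hn : n = "37pct" := String.toList_inj.mp (ht.symm.trans (by decide))
          subst hn; simp [PBuiltin]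
      · rintro (hp | hp | hp | hp | hp | hp | hp | hp) <;> subst hp
        · exact Or.inl (Or.inl (pvCancel ht (by decide)))
        · exact Or.inl (Or.inr (pvCancel ht (by decide)))
        · simp at ht
        · simp at ht
        · simp at ht
        · simp at ht
        · exact Or.inr (pvCancel ht (by decide))
        · simp at ht
    · have hd : n.toList.drop 2 = t := by
        rw [← ht]; simp
        --  "89".toList t
      simp only [Bool.or_eq_true, decide_eq_true_eq, slice_eq_iff n 2 (by norm_num)]
      rw [show ((2:Int).toNat) = 2 from rfl, hd]
      constructor
      · rintro ((h | h) | h) <;> subst h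
        · have hn : n = "89H" := String.toList_inj.mp (ht.symm.trans (by decide))
          subst hn; simp [PBuiltin]
        · have hn : n = "89V" := String.toList_inj.mp (ht.symm.trans (by decide))
          subst hn; simp [PBuiltin]
        · have hn : n = "89pct" := String.toList_inj.mp (ht.symm.trans (by decide))
          subst hn; simp [PBuiltin]
      · rintro (hp | hp | hp | hp | hp | hp | hp | hp) <;> subst hp
        · simp at ht
        · simp at ht
        · exact Or.inl (Or.inl (pvCancel ht (by decide)))
        · exact Or.inl (Or.inr (pvCancel ht (by decide)))
        · simp at ht
        · simp at ht
        · simp at ht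
        · exact Or.inr (pvCancel ht (by decide))
  · simp only [false_iff]
    rintro (hp | hp | hp | hp | hp | hp | hp | hp) <;> subst hp
    · exact h37 (by decide)
    · exact h37 (by decide)
    · exact h37 (by decide)
    · exact h37 (by decide)
    · exact hc (by decide)
    · exact hc (by decide)
    · exact h37 (by decide)
    · exact h37 (by decide)

lemma scan_eq (n : String) (pl : List String) :
    scanProducts n (n ++ "Nearest") pl = (pl.contains n || pl.contains (n ++ "Nearest")) := by
  induction pl with
  | nil => simp [scanProducts]
  | cons p rest ih =>
    simp only [scanProducts, List.contains_cons]
    by_cases h1 : p = n <;> by_cases h2 : p = n ++ "Nearest"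
    · simp [h1]
    · simp [h1]
    · simp [h2]
    · have g1 : (n == p) = false := by simp only [beq_eq_false_iff_ne]; exact fun h => h1 h.symm
      have g2 : (n ++ "Nearest" == p) = false := by
        simp only [beq_eq_false_iff_ne]; exact fun h => h2 h.symm
      simp [h1, h2, ih, g1, g2]
  
lemma a_iff (pl : List String) (n : String) :
    is_required_product (some pl) n = true ↔ (n ∈ pl ∨ (n ++ "Nearest") ∈ pl ∨ PBuiltin n) := by
  have k1 : n ++ "Nearest" ≠ "37H" := nearest_ne n _ (by decide) (by decide)
  have k2 : n ++ "Nearest" ≠ "37V" := nearest_ne n _ (by decide) (by decide)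
  have k3 : n ++ "Nearest" ≠ "89H" := nearest_ne n _ (by decide) (by decide)
  have k4 : n ++ "Nearest" ≠ "89V" := nearest_ne n _ (by decide) (by decide)
  have k5 : n ++ "Nearest" ≠ "color37" := nearest_ne n _ (by decide) (by decide)
  have k6 : n ++ "Nearest" ≠ "color89" := nearest_ne n _ (by decide) (by decide)
  have k7 : n ++ "Nearest" ≠ "37pct" := nearest_ne n _ (by decide) (by decide)
  have k8 : n ++ "Nearest" ≠ "89pct" := nearest_ne n _ (by decide) (by decide)
  simp only [is_required_product, RGBA_PRODUCTS, SINGLE_ARRAY_PRODUCTS]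
  split_ifs with h1 h2 h3 h4 h5 <;>
    simp_all [PBuiltin] <;> tauto

lemma b_iff (pl : List String) (n : String) :
    is_required_product_alt (some pl) n = true ↔ (n ∈ pl ∨ (n ++ "Nearest") ∈ pl ∨ PBuiltin n) := by
  simp only [is_required_product_alt, scan_eq]
  split_ifs with h <;> simp only [Bool.or_eq_true, List.contains_eq_mem, decide_eq_true_eq] at h
  · simp only [true_iff]; tauto
  · push Not at h
    rw [builtin_iff]
    simp [h.1, h.2]

-- ===== VERDICT =====
theorem is_required_product_spec : Claim_equal_is_required_product := by
  intro product_list product_name _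
  unfold Spec_is_required_product
  cases product_list with
  | none => rfl
  | some pl =>
    rw [Bool.eq_iff_iff, a_iff, b_iff]
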